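-- pv_equiv track=rewrite | github.com/sidprs/mem | neet/note.py | find_coverage_gaps
-- ===== SOURCE A (Python) =====
-- from typing import Dict, List, Tuple, Optional
--
-- def merge_intervals(intervals: List[Tuple[int, int]]) -> List[Tuple[int, int]]:
--     """
--     Merge overlapping intervals.
--
--     Args:
--         intervals: List of (start, end) tuples
--                    Example: [(1, 5), (3, 8), (10, 15)]
--
--     Returns:
--         List of merged intervals: [(1, 8), (10, 15)]
--
--     Time Complexity: O(n log n) - dominated by sorting
--     Space Complexity: O(n) - for output
--
--     USE CASE: Determine continuous coverage periods from multiple satellites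
--     """
--     if not intervals:
--         return []
--
--     # Sort by start time
--     intervals.sort(key=lambda x: x[0])
--
--     merged = [intervals[0]]
--
--     for start, end in intervals[1:]:
--         last_start, last_end = merged[-1]
--
--         if start <= last_end:  # Overlapping or touching
--             # Merge by extending the end time
--             merged[-1] = (last_start, max(last_end, end))
--         else:
--             # No overlap, add as new interval
--             merged.append((start, end))
--
--     return merged
--
-- def find_coverage_gaps(intervals: List[Tuple[int, int]],
--                        required_start: int,
--                        required_end: int) -> List[Tuple[int, int]]:
--     """
--     Find gaps in coverage within required time window.
--
--     Args:
--         intervals: List of coverage windows [(start, end), ...]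
--         required_start: When coverage should begin
--         required_end: When coverage should end
--
--     Returns:
--         List of gaps [(gap_start, gap_end), ...]
--         Returns [] if continuous coverage exists
--
--     USE CASE: Identify when user will lose satellite connection
--     """
--     if not intervals:
--         return [(required_start, required_end)]
--
--     # Merge overlapping intervals first
--     merged = merge_intervals(intervals)
--
--     gaps = []
--     current_position = required_start
--
--     for start, end in merged:
--         # Gap before this interval?
--         if start > current_position:
--             gaps.append((current_position, start))
--
--         # Move position to end of this interval
--         current_position = max(current_position, end)
--
--     # Gap at the end?
--     if current_position < required_end:
--         gaps.append((current_position, required_end))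
--
--     return gaps
-- ===== SOURCE B (Python) =====
-- def find_coverage_gaps(intervals, required_start, required_end):
--     # Single pass over the sorted intervals; no intermediate merged list.
--     # Like A, sorts `intervals` in place (same observable mutation).
--     if not intervals:
--         return [(required_start, required_end)]
--     intervals.sort(key=lambda x: x[0])
--     gaps = []
--     current_position = required_start
--     for start, end in intervals:
--         if start > current_position:
--             gaps.append((current_position, start))
--         current_position = max(current_position, end)
--     if current_position < required_end:
--         gaps.append((current_position, required_end))
--     return gaps
-- ===== Notes on version B (the rewrite author's own statement) =====
-- stated objective: simpler
-- what changed: B drops the merge_intervals pre-pass entirely: after sorting it finds the gaps in one linear scan of the sorted intervals, maintaining only current_position, instead of first building a merged interval list and then scanning it.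
import Mathlib
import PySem

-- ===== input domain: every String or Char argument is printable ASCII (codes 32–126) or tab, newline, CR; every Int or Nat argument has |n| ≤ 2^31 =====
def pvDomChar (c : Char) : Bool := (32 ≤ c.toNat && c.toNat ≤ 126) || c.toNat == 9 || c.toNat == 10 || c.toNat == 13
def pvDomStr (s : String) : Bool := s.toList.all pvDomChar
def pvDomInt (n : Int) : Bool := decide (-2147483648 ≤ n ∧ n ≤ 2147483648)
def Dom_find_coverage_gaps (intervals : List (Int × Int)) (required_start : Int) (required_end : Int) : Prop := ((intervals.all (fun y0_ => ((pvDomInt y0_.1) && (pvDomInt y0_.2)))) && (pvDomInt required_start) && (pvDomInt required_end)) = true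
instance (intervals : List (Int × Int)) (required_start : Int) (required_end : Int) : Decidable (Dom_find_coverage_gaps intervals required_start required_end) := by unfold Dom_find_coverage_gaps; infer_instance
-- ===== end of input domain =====

-- B fuses A's merge_intervals pre-pass and gap scan into one linear pass over the sorted
-- intervals (simpler; same O(n log n)). Both Pythons sort `intervals` in place; the
-- equivalence proved here is about the return value.


-- ===== PORT A =====
-- `merged` is kept REVERSED: head = Python's merged[-1]; merged[-1] = … is a head
-- rewrite, merged.append is a cons; the final .reverse restores Python's order.
def merge_intervals (intervals : List (Int × Int)) : List (Int × Int) :=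
  if intervals = [] then []
  else
    match PySem.List.sorted intervals (fun x => x.1) false with
    | [] => []   -- unreachable: sorting a nonempty list is nonempty
    | first :: rest =>
      (rest.foldl (fun merged p =>
        match merged with
        | last :: acc =>
            if p.1 ≤ last.2 then (last.1, max last.2 p.2) :: acc
            else p :: last :: acc
        | [] => [p]) [first]).reverse

def find_coverage_gaps (intervals : List (Int × Int)) (required_start : Int) (required_end : Int) : List (Int × Int) :=
  if intervals = [] then [(required_start, required_end)]
  else
    let merged := merge_intervals intervals
    let st := merged.foldl (fun (st : List (Int × Int) × Int) p =>
        (if p.1 > st.2 then st.1 ++ [(st.2, p.1)] else st.1, max st.2 p.2))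
      ([], required_start)
    if st.2 < required_end then st.1 ++ [(st.2, required_end)] else st.1

-- ===== PORT B =====
def find_coverage_gaps_alt (intervals : List (Int × Int)) (required_start : Int) (required_end : Int) : List (Int × Int) :=
  if intervals = [] then [(required_start, required_end)]
  else
    let st := (PySem.List.sorted intervals (fun x => x.1) false).foldl
      (fun (st : List (Int × Int) × Int) p =>
        (if p.1 > st.2 then st.1 ++ [(st.2, p.1)] else st.1, max st.2 p.2))
      ([], required_start)
    if st.2 < required_end then st.1 ++ [(st.2, required_end)] else st.1

-- ===== PRECONDITION & SPEC =====
def Spec_find_coverage_gaps (intervals : List (Int × Int)) (required_start : Int) (required_end : Int) (out : List (Int × Int)) : Prop := out = find_coverage_gaps_alt intervals required_start required_end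
instance (intervals : List (Int × Int)) (required_start : Int) (required_end : Int) (out : List (Int × Int)) : Decidable (Spec_find_coverage_gaps intervals required_start required_end out) := by unfold Spec_find_coverage_gaps; infer_instance

-- ===== CLAIM (what is proved, stated in full; the proofs are below) =====
def Claim_equal_find_coverage_gaps : Prop := ∀ (intervals : List (Int × Int)) (required_start : Int) (required_end : Int), Dom_find_coverage_gaps intervals required_start required_end → Spec_find_coverage_gaps intervals required_start required_end (find_coverage_gaps intervals required_start required_end)

-- ===== LEMMAS AND PROOFS =====

-- Functional form of A's merge loop (starting from the current last interval).
def mergeFrom : Int × Int → List (Int × Int) → List (Int × Int)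
  | last, [] => [last]
  | last, p :: t =>
      if p.1 ≤ last.2 then mergeFrom (last.1, max last.2 p.2) t
      else last :: mergeFrom p t

-- A's reversed-accumulator fold computes mergeFrom.
lemma foldl_merge_rev (t : List (Int × Int)) :
    ∀ (last : Int × Int) (acc : List (Int × Int)),
    (t.foldl (fun merged p =>
        match merged with
        | last :: acc =>
            if p.1 ≤ last.2 then (last.1, max last.2 p.2) :: acc
            else p :: last :: acc
        | [] => [p]) (last :: acc)).reverse
      = acc.reverse ++ mergeFrom last t := by
  induction t with
  | nil => intro last acc; simp [mergeFrom]
  | cons p t ih =>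
      intro last acc
      by_cases h : p.1 ≤ last.2
      · simp [List.foldl_cons, h, mergeFrom, ih]
      · simp [List.foldl_cons, h, mergeFrom, ih]

-- On a start-sorted list, scanning the merged list finds the same gaps as
-- scanning the list itself, from any state.
lemma scan_merge (t : List (Int × Int)) :
    ∀ (last : Int × Int) (gs : List (Int × Int)) (cur : Int),
    (last :: t).Pairwise (fun a b => a.1 ≤ b.1) →
    (mergeFrom last t).foldl (fun (st : List (Int × Int) × Int) p =>
        (if p.1 > st.2 then st.1 ++ [(st.2, p.1)] else st.1, max st.2 p.2)) (gs, cur)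
      = (last :: t).foldl (fun (st : List (Int × Int) × Int) p =>
        (if p.1 > st.2 then st.1 ++ [(st.2, p.1)] else st.1, max st.2 p.2)) (gs, cur) := by
  induction t with
  | nil => intro last gs cur _; simp [mergeFrom]
  | cons p t ih =>
      intro last gs cur hpw
      rcases List.pairwise_cons.1 hpw with ⟨hlast, hpw'⟩
      by_cases h : p.1 ≤ last.2
      · have hIH := ih (last.1, max last.2 p.2) gs cur (by
          refine List.pairwise_cons.2 ⟨?_, (List.pairwise_cons.1 hpw').2⟩
          intro b hb; exact hlast b (List.mem_cons_of_mem _ hb))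
        simp only [mergeFrom, h, if_pos, hIH, List.foldl_cons]
        congr 2
        · have : ¬ p.1 > max cur last.2 := by
            simp only [not_lt]; exact le_trans h (le_max_right _ _)
          simp [this]
        · omega
      · have hIH := ih p (if last.1 > cur then gs ++ [(cur, last.1)] else gs)
          (max cur last.2) hpw'
        simp only [mergeFrom, h, if_neg, not_false_iff, List.foldl_cons]
        simpa using hIH

-- ===== VERDICT (by name: the statement is the Claim_ definition above) =====
theorem find_coverage_gaps_spec : Claim_equal_find_coverage_gaps := by
  intro intervals rs re _
  unfold Spec_find_coverage_gaps find_coverage_gaps find_coverage_gaps_alt merge_intervals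
  by_cases hnil : intervals = []
  · simp [hnil]
  · simp only [hnil, if_neg, not_false_iff]
    rcases hs : PySem.List.sorted intervals (fun x => x.1) false with _ | ⟨first, rest⟩
    · exact absurd ((PySem.List.sorted_eq_nil_iff _ _ _).1 hs) hnil
    · have hpw : (first :: rest).Pairwise (fun a b : Int × Int => a.1 ≤ b.1) := by
        have := PySem.List.sorted_pairwise (xs := intervals) (key := fun x : Int × Int => x.1)
        rwa [hs] at this
      have h1 := foldl_merge_rev rest first []
      simp only [List.reverse_nil, List.nil_append] at h1
      simp only [h1, scan_merge rest first [] rs hpw]
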